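-- pv_equiv track=rewrite | github.com/Sonya-Shultz/curse | RetouchNSplitImg.py | aprox_in_array
-- ===== SOURCE A (Python) =====
-- def aprox_in_array(index, page):
--     max_i = 100000000
--     page_retouch = [[max_i, max_i], [max_i, -max_i], [-max_i, -max_i], [-max_i, max_i]]
--     for i in range(len(index)):
--         if index[i] == 0:
--             if page[i][0] < page_retouch[0][0]:
--                 page_retouch[0][0] = page[i][0]
--             if page[i][1] < page_retouch[0][1]:
--                 page_retouch[0][1] = page[i][1]
--         if index[i] == 1:
--             if page[i][0] < page_retouch[1][0]:
--                 page_retouch[1][0] = page[i][0]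
--             if page[i][1] > page_retouch[1][1]:
--                 page_retouch[1][1] = page[i][1]
--         if index[i] == 2:
--             if page[i][0] > page_retouch[2][0]:
--                 page_retouch[2][0] = page[i][0]
--             if page[i][1] > page_retouch[2][1]:
--                 page_retouch[2][1] = page[i][1]
--         if index[i] == 3:
--             if page[i][0] > page_retouch[3][0]:
--                 page_retouch[3][0] = page[i][0]
--             if page[i][1] < page_retouch[3][1]:
--                 page_retouch[3][1] = page[i][1]
--     return page_retouch
-- ===== SOURCE B (Python) =====
-- def aprox_in_array(index, page):
--     max_i = 100000000
--     groups = [[], [], [], []]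
--     for i in range(len(index)):
--         k = index[i]
--         if 0 <= k <= 3:
--             groups[k].append((page[i][0], page[i][1]))
--     g0, g1, g2, g3 = groups
--     return [
--         [min([max_i] + [x for x, _ in g0]), min([max_i] + [y for _, y in g0])],
--         [min([max_i] + [x for x, _ in g1]), max([-max_i] + [y for _, y in g1])],
--         [max([-max_i] + [x for x, _ in g2]), max([-max_i] + [y for _, y in g2])],
--         [max([-max_i] + [x for x, _ in g3]), min([max_i] + [y for _, y in g3])],
--     ]
-- ===== Notes on version B (the rewrite author's own statement) =====
-- stated objective: alternative
-- what changed: B first partitions the rows into four category groups in one scan and then computes each corner as a min/max reduction over its group (seeded with the sentinel), instead of A's single loop that conditionally mutates the four corner cells in place.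
import Mathlib
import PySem

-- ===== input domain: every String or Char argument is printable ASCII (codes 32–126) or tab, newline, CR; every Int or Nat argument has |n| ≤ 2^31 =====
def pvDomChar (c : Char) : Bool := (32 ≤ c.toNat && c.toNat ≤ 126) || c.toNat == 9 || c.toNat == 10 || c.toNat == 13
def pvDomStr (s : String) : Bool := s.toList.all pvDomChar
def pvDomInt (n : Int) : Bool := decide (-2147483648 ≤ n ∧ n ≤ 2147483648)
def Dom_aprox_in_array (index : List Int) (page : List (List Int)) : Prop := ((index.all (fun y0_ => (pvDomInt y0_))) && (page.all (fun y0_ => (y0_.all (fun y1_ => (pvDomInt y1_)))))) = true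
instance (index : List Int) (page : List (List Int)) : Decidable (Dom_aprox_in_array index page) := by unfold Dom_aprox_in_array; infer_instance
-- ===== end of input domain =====

-- B partitions rows into four category groups and reduces each with min/max folds,
-- instead of A's single loop conditionally mutating the four corner cells ("alternative" objective, same O(n) cost).

-- ===== PORT A =====
-- A's mutable page_retouch [[a0,a1],[b0,b1],[c0,c1],[d0,d1]] is carried as an 8-tuple of Ints.
-- index[i] / page[i][j] are in range on every admitted (Pre_) input; getD defaults are never reached there.
def stepA (index : List Int) (page : List (List Int))
    (s : Int × Int × Int × Int × Int × Int × Int × Int) (i : Nat) :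
    Int × Int × Int × Int × Int × Int × Int × Int :=
  let k := index.getD i 0
  let x := (page.getD i []).getD 0 0
  let y := (page.getD i []).getD 1 0
  ((if k = 0 ∧ x < s.1 then x else s.1),
   (if k = 0 ∧ y < s.2.1 then y else s.2.1),
   (if k = 1 ∧ x < s.2.2.1 then x else s.2.2.1),
   (if k = 1 ∧ y > s.2.2.2.1 then y else s.2.2.2.1),
   (if k = 2 ∧ x > s.2.2.2.2.1 then x else s.2.2.2.2.1),
   (if k = 2 ∧ y > s.2.2.2.2.2.1 then y else s.2.2.2.2.2.1),
   (if k = 3 ∧ x > s.2.2.2.2.2.2.1 then x else s.2.2.2.2.2.2.1),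
   (if k = 3 ∧ y < s.2.2.2.2.2.2.2 then y else s.2.2.2.2.2.2.2))

def aprox_in_array (index : List Int) (page : List (List Int)) : List (List Int) :=
  let max_i : Int := 100000000
  let s := (List.range index.length).foldl (stepA index page)
    (max_i, max_i, max_i, -max_i, -max_i, -max_i, -max_i, max_i)
  [[s.1, s.2.1], [s.2.2.1, s.2.2.2.1], [s.2.2.2.2.1, s.2.2.2.2.2.1], [s.2.2.2.2.2.2.1, s.2.2.2.2.2.2.2]]

-- ===== PORT B =====
-- B's group-building loop: append (page[i][0], page[i][1]) to group index[i] when 0 ≤ index[i] ≤ 3.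
def stepB (index : List Int) (page : List (List Int))
    (g : List (Int × Int) × List (Int × Int) × List (Int × Int) × List (Int × Int)) (i : Nat) :
    List (Int × Int) × List (Int × Int) × List (Int × Int) × List (Int × Int) :=
  let k := index.getD i 0
  if 0 ≤ k ∧ k ≤ 3 then
    let p := ((page.getD i []).getD 0 0, (page.getD i []).getD 1 0)
    if k = 0 then (g.1 ++ [p], g.2.1, g.2.2.1, g.2.2.2)
    else if k = 1 then (g.1, g.2.1 ++ [p], g.2.2.1, g.2.2.2)
    else if k = 2 then (g.1, g.2.1, g.2.2.1 ++ [p], g.2.2.2)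
    else (g.1, g.2.1, g.2.2.1, g.2.2.2 ++ [p])
  else g

-- Python's min([seed]+xs) / max([seed]+xs) ported as a fold of min / max seeded at the sentinel.
def aprox_in_array_alt (index : List Int) (page : List (List Int)) : List (List Int) :=
  let max_i : Int := 100000000
  let g := (List.range index.length).foldl (stepB index page) ([], [], [], [])
  [[(g.1.map Prod.fst).foldl min max_i, (g.1.map Prod.snd).foldl min max_i],
   [(g.2.1.map Prod.fst).foldl min max_i, (g.2.1.map Prod.snd).foldl max (-max_i)],
   [(g.2.2.1.map Prod.fst).foldl max (-max_i), (g.2.2.1.map Prod.snd).foldl max (-max_i)],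
   [(g.2.2.2.map Prod.fst).foldl max (-max_i), (g.2.2.2.map Prod.snd).foldl min max_i]]

-- ===== PRECONDITION & SPEC =====
-- Pre_ excludes exactly the inputs where Python A raises an IndexError:
-- a position whose category is in {0,1,2,3} must have a page row with at least two entries.
def Pre_aprox_in_array (index : List Int) (page : List (List Int)) : Prop :=
  ∀ i, i < index.length → (0 ≤ index.getD i 0 ∧ index.getD i 0 ≤ 3) →
    i < page.length ∧ 2 ≤ (page.getD i []).length
instance (index : List Int) (page : List (List Int)) : Decidable (Pre_aprox_in_array index page) := by
  unfold Pre_aprox_in_array; infer_instance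

def pvWitness_aprox_in_array : List Int × List (List Int) := ([0, 2, 7], [[1, 5], [3, 4], []])

def Spec_aprox_in_array (index : List Int) (page : List (List Int)) (out : List (List Int)) : Prop := out = aprox_in_array_alt index page
instance (index : List Int) (page : List (List Int)) (out : List (List Int)) : Decidable (Spec_aprox_in_array index page out) := by unfold Spec_aprox_in_array; infer_instance

-- ===== CLAIM (what is proved, stated in full; the proofs are below) =====
def Claim_equal_aprox_in_array : Prop := ∀ (index : List Int) (page : List (List Int)), Dom_aprox_in_array index page → Pre_aprox_in_array index page → Spec_aprox_in_array index page (aprox_in_array index page)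

-- ===== LEMMAS AND PROOFS =====

-- the reductions B applies to a group quadruple, as one packing function
def packG (g : List (Int × Int) × List (Int × Int) × List (Int × Int) × List (Int × Int)) :
    Int × Int × Int × Int × Int × Int × Int × Int :=
  ((g.1.map Prod.fst).foldl min 100000000, (g.1.map Prod.snd).foldl min 100000000,
   (g.2.1.map Prod.fst).foldl min 100000000, (g.2.1.map Prod.snd).foldl max (-100000000),
   (g.2.2.1.map Prod.fst).foldl max (-100000000), (g.2.2.1.map Prod.snd).foldl max (-100000000),
   (g.2.2.2.map Prod.fst).foldl max (-100000000), (g.2.2.2.map Prod.snd).foldl min 100000000)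

theorem foldl_min_append (m x : Int) (l : List Int) :
    (l ++ [x]).foldl min m = min (l.foldl min m) x := by
  simp [List.foldl_append]

theorem foldl_max_append (m x : Int) (l : List Int) :
    (l ++ [x]).foldl max m = max (l.foldl max m) x := by
  simp [List.foldl_append]

theorem step_comm (index : List Int) (page : List (List Int))
    (g : List (Int × Int) × List (Int × Int) × List (Int × Int) × List (Int × Int)) (i : Nat) :
    stepA index page (packG g) i = packG (stepB index page g i) := by
  simp only [stepA, stepB, packG, List.getD_eq_getElem?_getD]
  generalize (index[i]?).getD 0 = k
  generalize ((page[i]?).getD [])[0]?.getD 0 = x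
  generalize ((page[i]?).getD [])[1]?.getD 0 = y
  by_cases h0 : k = 0
  · simp [h0, foldl_min_append, foldl_max_append, min_def, max_def]
    split_ifs <;> omega
  · by_cases h1 : k = 1
    · simp [h0, h1, foldl_min_append, foldl_max_append, min_def, max_def]
      split_ifs <;> omega
    · by_cases h2 : k = 2
      · simp [h0, h1, h2, foldl_min_append, foldl_max_append, min_def, max_def]
        split_ifs <;> omega
      · by_cases h3 : k = 3
        · simp [h0, h1, h2, h3, foldl_min_append, foldl_max_append, min_def, max_def]
          split_ifs <;> omega
        · have hk : ¬ (0 ≤ k ∧ k ≤ 3) := by omega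
          simp [h0, h1, h2, h3, hk]

theorem fold_comm (index : List Int) (page : List (List Int)) (n : Nat) :
    (List.range n).foldl (stepA index page)
      (100000000, 100000000, 100000000, -100000000, -100000000, -100000000, -100000000, 100000000)
    = packG ((List.range n).foldl (stepB index page) ([], [], [], [])) := by
  induction n with
  | zero => simp [packG]
  | succ n ih =>
      rw [List.range_succ, List.foldl_append, List.foldl_append]
      simp only [List.foldl_cons, List.foldl_nil, ih, step_comm]

-- ===== VERDICT (by name: the statement is the Claim_ definition above) =====
theorem aprox_in_array_spec : Claim_equal_aprox_in_array := by
  intro index page _ _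
  unfold Spec_aprox_in_array aprox_in_array aprox_in_array_alt
  simp only [fold_comm, packG]
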